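-- pv_equiv track=rewrite | github.com/Hrishikesh-3459/leetCode | prob_1317.py | sortString
-- ===== SOURCE A (Python) =====
-- def sortString(s: str) -> str:
--     x = list(s)
--     ans = []
--     ans_2 = []
--     fin = []
--     count = 0
--     while True:
--         for i in sorted(x):
--             if (i not in ans):
--                 ans.append(i)
--                 count +=1
--                 x.pop(x.index(i))
--         for j in sorted(x)[::-1]:
--             if (j not in ans_2):
--                 count +=1
--                 ans_2.append(j)
--                 x.pop(x.index(j))
--         fin += ans + ans_2
--         if (count == len(s)):
--             break
--         ans.clear()
--         ans_2.clear()
--     ans_str = ""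
--     for j in fin:
--         ans_str += j
--     return ans_str
-- ===== SOURCE B (Python) =====
-- def _split(rem):
--     # one pass over a sorted list: first occurrence of each value vs. the rest
--     firsts, rest = [], []
--     prev = None
--     for ch in rem:
--         if prev == ch:
--             rest.append(ch)
--         else:
--             firsts.append(ch)
--             prev = ch
--     return firsts, rest
--
--
-- def sortString(s: str) -> str:
--     rem = sorted(s)
--     out = []
--     while rem:
--         firsts, rest = _split(rem)
--         out += firsts
--         firsts2, rest2 = _split(rest)
--         out += firsts2[::-1]
--         rem = rest2
--     return "".join(out)
-- ===== Notes on version B (the rewrite author's own statement) =====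
-- stated objective: faster
-- what changed: A re-sorts the remaining characters and does linear membership/index scans and pops every round; B sorts once and each round splits the still-sorted remainder into first occurrences and the rest by a single adjacent-comparison pass, appending the firsts ascending or reversed alternately.
import Mathlib
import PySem

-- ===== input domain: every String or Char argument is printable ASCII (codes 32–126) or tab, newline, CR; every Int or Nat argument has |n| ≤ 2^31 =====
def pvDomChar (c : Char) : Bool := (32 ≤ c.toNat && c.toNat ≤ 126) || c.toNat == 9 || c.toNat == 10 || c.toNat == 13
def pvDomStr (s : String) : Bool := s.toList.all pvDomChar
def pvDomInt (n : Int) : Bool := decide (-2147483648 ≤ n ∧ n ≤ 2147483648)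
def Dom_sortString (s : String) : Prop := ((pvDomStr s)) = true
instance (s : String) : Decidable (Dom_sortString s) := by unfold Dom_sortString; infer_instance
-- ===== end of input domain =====

-- B replaces A's per-round re-sorting with one initial sort and an adjacent-comparison split of
-- the sorted remainder each round (objective: faster).

-- ===== PORT A =====

-- x.pop(x.index(i)) : remove the first occurrence of i from x.  The `none` branches are
-- unreachable at every call site (i is always present in x there; Python never raises).
def pvEraseFirst (x : List Char) (i : Char) : List Char :=
  match PySem.List.index? x i with
  | some k =>
    match PySem.List.pop? x (k : Int) with
    | some r => r.2
    | none => x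
  | none => x

-- one of A's inner 'for … in ys: if … not in ans: append / count += 1 / pop' passes;
-- state = (ans, x, count)
def pvPass (ys : List Char) (x : List Char) (cnt : Nat) : List Char × List Char × Nat :=
  ys.foldl
    (fun st i =>
      if st.1.contains i then st
      else (st.1 ++ [i], pvEraseFirst st.2.1 i, st.2.2 + 1))
    ([], x, cnt)

-- A's 'while True' loop; n = len(s); the fuel n+1 only makes the recursion structural —
-- the Python loop always breaks within that many rounds (each round removes ≥ 1 char)
def pvLoopA (n : Nat) : Nat → List Char → List Char → Nat → List Char
  | 0, _, fin, _ => fin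
  | f + 1, x, fin, cnt =>
    let p1 := pvPass (PySem.List.sorted x (fun c => c)) x cnt
    let p2 := pvPass
      ((PySem.List.slice? (PySem.List.sorted p1.2.1 (fun c => c)) none none (-1)).getD [])
      p1.2.1 p1.2.2
    let fin' := fin ++ p1.1 ++ p2.1
    if p2.2.2 = n then fin' else pvLoopA n f p2.2.1 fin' p2.2.2

-- Python str concatenation is modelled on List Char (exact), wrapped by String.ofList at the end
def sortString (s : String) : String :=
  String.ofList
    ((pvLoopA s.toList.length (s.toList.length + 1) s.toList [] 0).foldl
      (fun acc j => acc ++ [j]) [])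

-- ===== PORT B =====

-- _split: one pass over the sorted remainder, first occurrences vs the rest
def pvSplit : Option Char → List Char → List Char × List Char
  | _, [] => ([], [])
  | prev, a :: t =>
    if prev = some a then
      let r := pvSplit prev t
      (r.1, a :: r.2)
    else
      let r := pvSplit (some a) t
      (a :: r.1, r.2)

-- B's 'while rem' loop; same structural fuel (n+1), always sufficient
def pvLoopB : Nat → List Char → List Char → List Char
  | 0, _, out => out
  | f + 1, rem, out =>
    if rem = [] then out
    else
      let p := pvSplit none rem
      let q := pvSplit none p.2
      pvLoopB f q.2 (out ++ p.1 ++ q.1.reverse)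

def sortString_alt (s : String) : String :=
  String.ofList (pvLoopB (s.toList.length + 1) (PySem.List.sorted s.toList (fun c => c)) [])

-- ===== PRECONDITION & SPEC =====
def Spec_sortString (s : String) (out : String) : Prop := out = sortString_alt s
instance (s : String) (out : String) : Decidable (Spec_sortString s out) := by unfold Spec_sortString; infer_instance

-- ===== CLAIM (what is proved, stated in full; the proofs are below) =====
def Claim_equal_sortString : Prop := ∀ (s : String), Dom_sortString s → Spec_sortString s (sortString s)

-- ===== LEMMAS AND PROOFS =====

theorem pvEraseFirst_of_mem (x : List Char) (i : Char) (h : i ∈ x) :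
    pvEraseFirst x i = x.erase i := by
  have hs : (PySem.List.index? x i).isSome := (PySem.List.index?_isSome_iff x i).2 h
  obtain ⟨k, hk⟩ := Option.isSome_iff_exists.1 hs
  have hkk : x.idxOf i = k := by
    rw [List.idxOf_eq_getD_idxOf?, ← PySem.List.index?_eq_idxOf?, hk]; rfl
  have hlt : k < x.length := hkk ▸ List.idxOf_lt_length_of_mem h
  unfold pvEraseFirst
  rw [hk]
  simp only [PySem.List.pop?_natCast x k hlt]
  rw [← hkk, List.eraseIdx_idxOf_eq_erase]

-- the list of first occurrences A's pass appends to ans, given what is already in ans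
def pvDK : List Char → List Char → List Char
  | [], _ => []
  | a :: t, seen => if seen.contains a then pvDK t seen else a :: pvDK t (seen ++ [a])

theorem pvDK_sublist (ys : List Char) : ∀ seen, (pvDK ys seen).Sublist ys := by
  induction ys with
  | nil => intro seen; simp [pvDK]
  | cons a t ih =>
    intro seen
    rw [pvDK]
    split_ifs with hs
    · exact (ih seen).cons a
    · exact (ih (seen ++ [a])).cons₂ a

theorem pvDK_count (ys : List Char) :
    ∀ seen c, (pvDK ys seen).count c = if c ∈ ys ∧ c ∉ seen then 1 else 0 := by
  induction ys with
  | nil => intro seen c; simp [pvDK]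
  | cons a t ih =>
    intro seen c
    by_cases hsa : a ∈ seen
    · rw [pvDK, if_pos (List.contains_iff_mem.2 hsa), ih seen c]
      by_cases hct : c ∈ t <;> by_cases hcs : c ∈ seen <;> by_cases hca : c = a <;>
        simp_all
    · rw [pvDK, if_neg (fun hb => hsa (List.contains_iff_mem.1 hb)),
        List.count_cons, ih (seen ++ [a]) c]
      by_cases hct : c ∈ t <;> by_cases hcs : c ∈ seen <;> by_cases hca : c = a <;>
        simp_all <;> (try exact fun e => hca e.symm)

-- A's pass with a general initial state; pvPass ys x cnt = pvPassG [] x cnt ys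
def pvPassG (ans x : List Char) (cnt : Nat) (ys : List Char) : List Char × List Char × Nat :=
  ys.foldl
    (fun st i =>
      if st.1.contains i then st
      else (st.1 ++ [i], pvEraseFirst st.2.1 i, st.2.2 + 1))
    (ans, x, cnt)

theorem pvPassG_spec (ys : List Char) : ∀ ans x cnt, (∀ i ∈ ys, i ∉ ans → i ∈ x) →
    (pvPassG ans x cnt ys).1 = ans ++ pvDK ys ans
    ∧ (∀ c, (pvPassG ans x cnt ys).2.1.count c = x.count c - (pvDK ys ans).count c)
    ∧ (pvPassG ans x cnt ys).2.1.length + (pvDK ys ans).length = x.length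
    ∧ (pvPassG ans x cnt ys).2.2 = cnt + (pvDK ys ans).length := by
  induction ys with
  | nil => intro ans x cnt _; simp [pvPassG, pvDK]
  | cons a t ih =>
    intro ans x cnt hyp
    by_cases hsa : a ∈ ans
    · have hb : ans.contains a = true := List.contains_iff_mem.2 hsa
      have hstep : pvPassG ans x cnt (a :: t) = pvPassG ans x cnt t := by
        simp [pvPassG, List.foldl_cons, hsa]
      have hdk : pvDK (a :: t) ans = pvDK t ans := by
        rw [pvDK, if_pos hb]
      rw [hstep, hdk]
      exact ih ans x cnt (fun i hi hni => hyp i (List.mem_cons_of_mem a hi) hni)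
    · have hb : ¬ ans.contains a = true := fun hb => hsa (List.contains_iff_mem.1 hb)
      have hax : a ∈ x := hyp a List.mem_cons_self hsa
      have hstep : pvPassG ans x cnt (a :: t)
          = pvPassG (ans ++ [a]) (x.erase a) (cnt + 1) t := by
        simp [pvPassG, List.foldl_cons, hsa, pvEraseFirst_of_mem x a hax]
      have hdk : pvDK (a :: t) ans = a :: pvDK t (ans ++ [a]) := by
        rw [pvDK, if_neg hb]
      obtain ⟨ih1, ih2, ih3, ih4⟩ := ih (ans ++ [a]) (x.erase a) (cnt + 1)
        (fun i hi hni => by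
          have hia : i ≠ a := fun e => hni (by simp [e])
          have hix : i ∈ x := hyp i (List.mem_cons_of_mem a hi)
            (fun hm => hni (List.mem_append_left _ hm))
          exact (List.mem_erase_of_ne hia).2 hix)
      rw [hstep, hdk]
      refine ⟨by rw [ih1, List.append_assoc]; rfl, fun c => ?_, ?_, ?_⟩
      · rw [ih2 c, List.count_erase, List.count_cons]
        by_cases hca : c = a
        · subst hca; simp; omega
        · have hac : ¬ a = c := fun e => hca e.symm
          simp [hac]
      · have := List.length_erase_add_one hax
        simp only [List.length_cons] at *
        omega
      · rw [ih4]; simp; omega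

theorem pvSplit_fst_sublist : ∀ (rem : List Char) (prev : Option Char),
    (pvSplit prev rem).1.Sublist rem := by
  intro rem
  induction rem with
  | nil => intro prev; simp [pvSplit]
  | cons a t ih =>
    intro prev
    rw [pvSplit]
    split_ifs with h
    · exact (ih prev).cons a
    · exact (ih (some a)).cons₂ a

theorem pvSplit_snd_sublist : ∀ (rem : List Char) (prev : Option Char),
    (pvSplit prev rem).2.Sublist rem := by
  intro rem
  induction rem with
  | nil => intro prev; simp [pvSplit]
  | cons a t ih =>
    intro prev
    rw [pvSplit]
    split_ifs with h
    · exact (ih prev).cons₂ a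
    · exact (ih (some a)).cons a

theorem pvSplit_count : ∀ (rem : List Char) (prev : Option Char),
    rem.Pairwise (· ≤ ·) → (∀ p, prev = some p → ∀ b ∈ rem, p ≤ b) →
    (∀ c, (pvSplit prev rem).1.count c = if prev = some c then 0 else min 1 (rem.count c))
    ∧ (∀ c, (pvSplit prev rem).2.count c = rem.count c - (pvSplit prev rem).1.count c) := by
  intro rem
  induction rem with
  | nil =>
    intro prev _ _
    constructor <;> intro c <;> simp [pvSplit]
  | cons a t ih =>
    intro prev hsorted hprev
    have hta : ∀ b ∈ t, a ≤ b := fun b hb => (List.pairwise_cons.1 hsorted).1 b hb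
    have hts : t.Pairwise (· ≤ ·) := (List.pairwise_cons.1 hsorted).2
    by_cases hpa : prev = some a
    · obtain ⟨ih1, ih2⟩ := ih prev hts
        (fun p hp b hb => hprev p hp b (List.mem_cons_of_mem a hb))
      rw [pvSplit, if_pos hpa]
      constructor <;> intro c
      · rw [ih1 c]
        by_cases hca : c = a
        · subst hca; simp [hpa]
        · simp only [List.count_cons]
          have : ¬ (a = c) := fun e => hca e.symm
          simp [this]
      · rw [List.count_cons, List.count_cons, ih2 c, ih1 c]
        by_cases hca : c = a
        · subst hca
          simp [hpa]
        · have : ¬ (a = c) := fun e => hca e.symm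
          simp [this]
    · obtain ⟨ih1, ih2⟩ := ih (some a) hts (fun p hp b hb => by
        cases hp; exact hta b hb)
      rw [pvSplit, if_neg hpa]
      constructor <;> intro c
      · rw [List.count_cons, ih1 c]
        by_cases hca : c = a
        · subst hca
          simp [hpa]
        · have hac : ¬ (a = c) := fun e => hca e.symm
          by_cases hpc : prev = some c
          · have hct : c ∉ t := by
              intro hct
              have h1 : c ≤ a := by
                cases hpc
                exact hprev c rfl a List.mem_cons_self
              have h2 : a ≤ c := hta c hct
              exact hca (le_antisymm h1 h2)
            simp [hpc, hac, List.count_eq_zero_of_not_mem hct]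
          · simp [hpc, hac]
      · rw [List.count_cons, List.count_cons, ih2 c, ih1 c]
        by_cases hca : c = a
        · subst hca; simp
        · have hac : ¬ (a = c) := fun e => hca e.symm
          by_cases hpc : prev = some c <;> simp [hac]

theorem pv_eq_of_sorted_count {l₁ l₂ : List Char} (h₁ : l₁.Pairwise (· ≤ ·))
    (h₂ : l₂.Pairwise (· ≤ ·)) (hc : ∀ c, l₁.count c = l₂.count c) : l₁ = l₂ :=
  PySem.List.eq_of_perm_of_pairwise_le_of_injective (fun c => c) (fun _ _ e => e)
    (List.perm_iff_count.2 hc) h₁ h₂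

theorem pv_nil_of_count_zero {l : List Char} (h : ∀ c, l.count c = 0) : l = [] := by
  cases l with
  | nil => rfl
  | cons a t => have := h a; simp at this

theorem pvLoopB_nil (f : Nat) (out : List Char) : pvLoopB f [] out = out := by
  cases f <;> simp [pvLoopB]

theorem pvLoop_eq' (n : Nat) : ∀ (f : Nat) (x rem fin : List Char) (cnt : Nat),
    rem.Pairwise (· ≤ ·) → (∀ c, rem.count c = x.count c) → cnt + x.length = n →
    pvLoopA n f x fin cnt = pvLoopB f rem fin := by
  intro f
  induction f with
  | zero => intro x rem fin cnt _ _ _; rfl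
  | succ f ih =>
    intro x rem fin cnt hsorted hcount hsum
    by_cases hrem : rem = []
    · have hx : x = [] := pv_nil_of_count_zero (fun c => by rw [← hcount c, hrem]; simp)
      subst hrem hx
      have hn : cnt = n := by simpa using hsum
      have hsnil : PySem.List.sorted ([] : List Char) (fun c => c) = [] := rfl
      simp [pvLoopA, pvLoopB, pvPass, hsnil, PySem.List.slice?_none_none_neg_one, hn]
    · set YS1 := PySem.List.sorted x (fun c => c) with hYS1
      set P1 := pvPassG [] x cnt YS1 with hP1
      set YS2 := (PySem.List.slice? (PySem.List.sorted P1.2.1 (fun c => c)) none none (-1)).getD []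
        with hYS2
      set P2 := pvPassG [] P1.2.1 P1.2.2 YS2 with hP2
      set Q1 := pvSplit none rem with hQ1
      set Q2 := pvSplit none Q1.2 with hQ2
      have e1 : pvLoopA n (f + 1) x fin cnt
          = if P2.2.2 = n then fin ++ P1.1 ++ P2.1
            else pvLoopA n f P2.2.1 (fin ++ P1.1 ++ P2.1) P2.2.2 := rfl
      have e2 : pvLoopB (f + 1) rem fin
          = if rem = [] then fin else pvLoopB f Q2.2 (fin ++ Q1.1 ++ Q2.1.reverse) := rfl
      rw [e1, e2, if_neg hrem]
      have hys2 : YS2 = (PySem.List.sorted P1.2.1 (fun c => c)).reverse := by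
        rw [hYS2, PySem.List.slice?_none_none_neg_one]; rfl
      obtain ⟨h11, h12, h13, h14⟩ := pvPassG_spec YS1 [] x cnt
        (fun i hi _ => (PySem.List.mem_sorted x (fun c => c) false i).1 (hYS1 ▸ hi))
      obtain ⟨h21, h22, h23, h24⟩ := pvPassG_spec YS2 [] P1.2.1 P1.2.2
        (fun i hi _ => by
          rw [hys2] at hi
          exact (PySem.List.mem_sorted _ _ false i).1 (List.mem_reverse.1 hi))
      obtain ⟨hs11, hs12⟩ := pvSplit_count rem none hsorted (fun p hp => by cases hp)
      have hr1pw : Q1.2.Pairwise (· ≤ ·) :=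
        List.Pairwise.sublist (pvSplit_snd_sublist rem none) hsorted
      obtain ⟨hs21, hs22⟩ := pvSplit_count Q1.2 none hr1pw (fun p hp => by cases hp)
      rw [← hP1] at h11 h12 h13 h14
      rw [← hP2] at h21 h22 h23 h24
      rw [← hQ1] at hs11 hs12
      rw [← hQ2] at hs21 hs22
      rw [List.nil_append] at h11 h21
      -- counts of the ascending halves
      have hmemx : ∀ c : Char, c ∈ YS1 ↔ c ∈ x := fun c =>
        (hYS1 ▸ PySem.List.mem_sorted x (fun c => c) false c)
      have ha1 : ∀ c, P1.1.count c = min 1 (x.count c) := fun c => by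
        rw [h11, pvDK_count]
        by_cases hcx : c ∈ x
        · have := List.count_pos_iff.mpr hcx
          simp [(hmemx c).mpr hcx]; omega
        · have hz : x.count c = 0 := List.count_eq_zero_of_not_mem hcx
          have hny : c ∉ YS1 := fun h => hcx ((hmemx c).mp h)
          simp [hz, hny]
      have hf1 : ∀ c, Q1.1.count c = min 1 (x.count c) := fun c => by
        rw [hs11 c, hcount c]; simp
      -- ascending halves are equal
      have hEq1 : P1.1 = Q1.1 :=
        pv_eq_of_sorted_count
          (List.Pairwise.sublist (h11 ▸ pvDK_sublist YS1 [])
            (hYS1 ▸ PySem.List.sorted_pairwise x (fun c => c)))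
          (List.Pairwise.sublist (pvSplit_fst_sublist rem none) hsorted)
          (fun c => by rw [ha1 c, hf1 c])
      -- remainders after the first half agree in counts
      have hx1r1 : ∀ c, Q1.2.count c = P1.2.1.count c := fun c => by
        rw [hs12 c, h12 c, hf1 c, hcount c, pvDK_count]
        by_cases hcx : c ∈ x
        · have hpos := List.count_pos_iff.mpr hcx
          simp [(hmemx c).mpr hcx]
          omega
        · have hz : x.count c = 0 := List.count_eq_zero_of_not_mem hcx
          simp [hz]
      -- counts of the descending halves
      have hmemx1 : ∀ c : Char, c ∈ YS2 ↔ c ∈ P1.2.1 := fun c => by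
        rw [hys2, List.mem_reverse]
        exact PySem.List.mem_sorted _ _ false c
      have ha2 : ∀ c, P2.1.count c = min 1 (P1.2.1.count c) := fun c => by
        rw [h21, pvDK_count]
        by_cases hcx : c ∈ P1.2.1
        · have := List.count_pos_iff.mpr hcx
          simp [(hmemx1 c).mpr hcx]; omega
        · have hz : P1.2.1.count c = 0 := List.count_eq_zero_of_not_mem hcx
          have hny : c ∉ YS2 := fun h => hcx ((hmemx1 c).mp h)
          simp [hz, hny]
      have hf2 : ∀ c, Q2.1.count c = min 1 (P1.2.1.count c) := fun c => by
        rw [hs21 c, hx1r1 c]; simp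
      -- descending halves: P2.1 is the reverse of Q2.1
      have hEq2 : P2.1.reverse = Q2.1 := by
        apply pv_eq_of_sorted_count
        · have hsub : P2.1.Sublist (PySem.List.sorted P1.2.1 (fun c => c)).reverse :=
            hys2 ▸ (h21 ▸ pvDK_sublist YS2 [])
          have := hsub.reverse
          rw [List.reverse_reverse] at this
          exact List.Pairwise.sublist this (PySem.List.sorted_pairwise P1.2.1 (fun c => c))
        · exact List.Pairwise.sublist (pvSplit_fst_sublist Q1.2 none) hr1pw
        · intro c
          rw [List.count_reverse, ha2 c, hf2 c]
      have hEq2' : P2.1 = Q2.1.reverse := by rw [← hEq2, List.reverse_reverse]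
      -- remainders after the round agree in counts
      have hx2r2 : ∀ c, Q2.2.count c = P2.2.1.count c := fun c => by
        rw [hs22 c, h22 c, hf2 c, hx1r1 c]
        have : (pvDK YS2 []).count c = min 1 (P1.2.1.count c) := by rw [← h21]; exact ha2 c
        rw [this]
      have hr2pw : Q2.2.Pairwise (· ≤ ·) :=
        List.Pairwise.sublist (pvSplit_snd_sublist Q1.2 none) hr1pw
      -- bookkeeping: count value and lengths
      have hsum2 : P2.2.2 + P2.2.1.length = n := by
        have l1 : P1.2.1.length + P1.1.length = x.length := by rw [h11]; exact h13
        have l2 : P2.2.1.length + P2.1.length = P1.2.1.length := by rw [h21]; exact h23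
        have c1 : P1.2.2 = cnt + P1.1.length := by rw [h11]; exact h14
        have c2 : P2.2.2 = P1.2.2 + P2.1.length := by rw [h21]; exact h24
        omega
      rw [hEq1, hEq2']
      by_cases hx2 : P2.2.1 = []
      · have hq2 : Q2.2 = [] := pv_nil_of_count_zero (fun c => by
          rw [hx2r2 c, hx2]; simp)
        have hcn : P2.2.2 = n := by rw [hx2] at hsum2; simpa using hsum2
        rw [if_pos hcn, hq2, pvLoopB_nil]
      · have hlen : 0 < P2.2.1.length := List.length_pos_iff.mpr hx2
        have hcn : ¬ P2.2.2 = n := by omega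
        rw [if_neg hcn]
        exact ih P2.2.1 Q2.2 (fin ++ Q1.1 ++ Q2.1.reverse) P2.2.2 hr2pw hx2r2 (by omega)

-- ===== VERDICT (by name: the statement is the Claim_ definition above) =====
theorem sortString_spec : Claim_equal_sortString := by
  intro s _
  unfold Spec_sortString sortString sortString_alt
  rw [PySem.List.foldl_append_singleton, List.nil_append]
  exact congrArg String.ofList (pvLoop_eq' s.toList.length (s.toList.length + 1) s.toList _ [] 0
    (PySem.List.sorted_pairwise s.toList (fun c => c))
    (fun c => (PySem.List.sorted_perm s.toList (fun c => c) false).count_eq c)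
    (by simp))
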